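-- pv_equiv track=rewrite | github.com/Laureano4656/Facultad-2025 | 2do-Cuatrimestre/Teoria-de-Info/utilP1.py | isInstantaneo
-- ===== SOURCE A (Python) =====
-- def isInstantaneo(codigo):
--   band = 1
--   i = 0
--   while (i<len(codigo) and band):
--     j=0
--     while (j<len(codigo) and band):
--       if (j!=i and codigo[j].startswith(codigo[i])):
--         band = 0
--       j+=1
--     i+=1
--   return band
-- ===== SOURCE B (Python) =====
-- def isInstantaneo(codigo):
--     s = sorted(codigo)
--     for a, b in zip(s, s[1:]):
--         if b.startswith(a):
--             return 0
--     return 1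
-- ===== Notes on version B (the rewrite author's own statement) =====
-- stated objective: alternative
-- what changed: Replaced the all-pairs nested-loop prefix scan by sorting the code lexicographically and checking only adjacent pairs for a prefix relation.
import Mathlib
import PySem

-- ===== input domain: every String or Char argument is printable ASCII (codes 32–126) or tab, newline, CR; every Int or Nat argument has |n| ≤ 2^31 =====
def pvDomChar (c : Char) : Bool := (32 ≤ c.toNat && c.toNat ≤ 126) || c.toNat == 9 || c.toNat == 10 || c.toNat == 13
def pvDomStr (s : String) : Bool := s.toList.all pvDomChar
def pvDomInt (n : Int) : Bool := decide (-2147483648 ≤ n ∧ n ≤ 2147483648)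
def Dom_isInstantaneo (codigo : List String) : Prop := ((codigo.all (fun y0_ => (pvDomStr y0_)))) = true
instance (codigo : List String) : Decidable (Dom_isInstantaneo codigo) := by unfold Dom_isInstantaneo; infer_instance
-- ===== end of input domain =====

-- B sorts the code lexicographically and checks only adjacent pairs for a prefix
-- relation, instead of A's all-pairs nested scan (an alternative algorithm).

-- ===== PORT A =====
-- inner 'while (j<len(codigo) and band)' loop of A
def pvLoopJ (codigo : List String) (i j : Nat) (band : Int) : Int :=
  if h : j < codigo.length ∧ band ≠ 0 then
    pvLoopJ codigo i (j + 1)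
      (if j ≠ i ∧ PySem.Str.startswith (codigo.getD j "") (codigo.getD i "") then 0 else band)
  else band
termination_by codigo.length - j
decreasing_by omega

-- outer 'while (i<len(codigo) and band)' loop of A
def pvLoopI (codigo : List String) (i : Nat) (band : Int) : Int :=
  if h : i < codigo.length ∧ band ≠ 0 then
    pvLoopI codigo (i + 1) (pvLoopJ codigo i 0 band)
  else band
termination_by codigo.length - i
decreasing_by omega

def isInstantaneo (codigo : List String) : Int := pvLoopI codigo 0 1

-- ===== PORT B =====
-- 'for a, b in zip(s, s[1:]): if b.startswith(a): return 0' over the sorted list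
def pvAdjViol : List String → Bool
  | x :: y :: rest => PySem.Str.startswith y x || pvAdjViol (y :: rest)
  | _ => false

def isInstantaneo_alt (codigo : List String) : Int :=
  if pvAdjViol (PySem.List.sorted codigo (fun s => s) false) then 0 else 1

-- ===== PRECONDITION & SPEC =====
def Spec_isInstantaneo (codigo : List String) (out : Int) : Prop := out = isInstantaneo_alt codigo
instance (codigo : List String) (out : Int) : Decidable (Spec_isInstantaneo codigo out) := by unfold Spec_isInstantaneo; infer_instance

-- ===== CLAIM (what is proved, stated in full; the proofs are below) =====
def Claim_equal_isInstantaneo : Prop := ∀ (codigo : List String), Dom_isInstantaneo codigo → Spec_isInstantaneo codigo (isInstantaneo codigo)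

-- ===== LEMMAS AND PROOFS =====

-- 'codigo[j].startswith(codigo[i])' at distinct positions j ≠ i
def pvViol (xs : List String) (i j : Nat) : Prop :=
  j ≠ i ∧ PySem.Str.startswith (xs.getD j "") (xs.getD i "") = true

-- some pair of distinct positions violates prefix-freeness
def pvBad (xs : List String) : Prop :=
  ∃ i j, i < xs.length ∧ j < xs.length ∧ pvViol xs i j

-- multiset form of pvBad (permutation-invariant)
def pvBadM (xs : List String) : Prop :=
  ∃ x y : String, x.toList <+: y.toList ∧ List.Subperm [x, y] xs

theorem pvViol_iff (xs : List String) (i j : Nat) :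
    pvViol xs i j ↔ j ≠ i ∧ (xs.getD i "").toList <+: (xs.getD j "").toList := by
  unfold pvViol
  rw [PySem.Str.startswith_eq, PySem.Chars.startswith_iff]

-- ---- A-side characterisation ----

theorem pvLoopJ_zero (xs : List String) (i j : Nat) : pvLoopJ xs i j 0 = 0 := by
  rw [pvLoopJ, dif_neg (by simp)]

theorem pvLoopI_zero (xs : List String) (i : Nat) : pvLoopI xs i 0 = 0 := by
  rw [pvLoopI, dif_neg (by simp)]

theorem pvLoopJ_one_of_viol (xs : List String) (i j : Nat)
    (h : ∃ k, j ≤ k ∧ k < xs.length ∧ pvViol xs i k) : pvLoopJ xs i j 1 = 0 := by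
  obtain ⟨k, hjk, hk, hv⟩ := h
  suffices H : ∀ m j, j ≤ k → xs.length - j = m → pvLoopJ xs i j 1 = 0 from H _ j hjk rfl
  intro m
  induction m with
  | zero => intro j hjk hd; omega
  | succ m ih =>
    intro j hjk hd
    rw [pvLoopJ]
    rcases Nat.eq_or_lt_of_le hjk with rfl | hlt
    · rw [dif_pos ⟨hk, one_ne_zero⟩, if_pos ⟨hv.1, hv.2⟩]
      exact pvLoopJ_zero xs i (j + 1)
    · rw [dif_pos ⟨by omega, one_ne_zero⟩]
      by_cases hj : j ≠ i ∧ PySem.Str.startswith (xs.getD j "") (xs.getD i "") = true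
      · rw [if_pos ⟨hj.1, hj.2⟩]; exact pvLoopJ_zero xs i (j + 1)
      · rw [if_neg (by simpa using hj)]
        exact ih (j + 1) (by omega) (by omega)

theorem pvLoopJ_one_of_no_viol (xs : List String) (i j : Nat)
    (h : ∀ k, j ≤ k → k < xs.length → ¬ pvViol xs i k) : pvLoopJ xs i j 1 = 1 := by
  suffices H : ∀ m j, (∀ k, j ≤ k → k < xs.length → ¬ pvViol xs i k) →
      xs.length - j = m → pvLoopJ xs i j 1 = 1 from H _ j h rfl
  intro m
  induction m with
  | zero => intro j _ hd; rw [pvLoopJ, dif_neg (by omega)]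
  | succ m ih =>
    intro j h hd
    rw [pvLoopJ, dif_pos ⟨by omega, one_ne_zero⟩]
    have hnv := h j le_rfl (by omega)
    rw [if_neg (by simpa [pvViol] using hnv)]
    exact ih (j + 1) (fun k hk hk2 => h k (by omega) hk2) (by omega)

theorem pvLoopI_one_of_bad (xs : List String) (i : Nat)
    (h : ∃ i' k, i ≤ i' ∧ i' < xs.length ∧ k < xs.length ∧ pvViol xs i' k) :
    pvLoopI xs i 1 = 0 := by
  obtain ⟨i', k, hii, hi', hk, hv⟩ := h
  suffices H : ∀ m i, i ≤ i' → xs.length - i = m → pvLoopI xs i 1 = 0 from H _ i hii rfl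
  intro m
  induction m with
  | zero => intro i hii hd; omega
  | succ m ih =>
    intro i hii hd
    rw [pvLoopI, dif_pos ⟨by omega, one_ne_zero⟩]
    by_cases hj0 : ∃ k2, k2 < xs.length ∧ pvViol xs i k2
    · obtain ⟨k2, hk2, hv2⟩ := hj0
      rw [pvLoopJ_one_of_viol xs i 0 ⟨k2, Nat.zero_le k2, hk2, hv2⟩]
      exact pvLoopI_zero xs (i + 1)
    · have hne : i ≠ i' := fun he => hj0 ⟨k, hk, he ▸ hv⟩
      rw [pvLoopJ_one_of_no_viol xs i 0 (fun k2 _ h2 hv2 => hj0 ⟨k2, h2, hv2⟩)]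
      exact ih (i + 1) (by omega) (by omega)

theorem pvLoopI_one_of_good (xs : List String) (i : Nat)
    (h : ∀ i' k, i ≤ i' → i' < xs.length → k < xs.length → ¬ pvViol xs i' k) :
    pvLoopI xs i 1 = 1 := by
  suffices H : ∀ m i, (∀ i' k, i ≤ i' → i' < xs.length → k < xs.length → ¬ pvViol xs i' k) →
      xs.length - i = m → pvLoopI xs i 1 = 1 from H _ i h rfl
  intro m
  induction m with
  | zero => intro i _ hd; rw [pvLoopI, dif_neg (by omega)]
  | succ m ih =>
    intro i h hd
    rw [pvLoopI, dif_pos ⟨by omega, one_ne_zero⟩]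
    rw [pvLoopJ_one_of_no_viol xs i 0 (fun k _ hk => h i k le_rfl (by omega) hk)]
    exact ih (i + 1) (fun i' k h1 h2 h3 => h i' k (by omega) h2 h3) (by omega)

theorem isInstantaneo_eq_zero_of_bad (xs : List String) (h : pvBad xs) :
    isInstantaneo xs = 0 := by
  obtain ⟨i, j, hi, hj, hv⟩ := h
  exact pvLoopI_one_of_bad xs 0 ⟨i, j, Nat.zero_le i, hi, hj, hv⟩

theorem isInstantaneo_eq_one_of_good (xs : List String) (h : ¬ pvBad xs) :
    isInstantaneo xs = 1 :=
  pvLoopI_one_of_good xs 0 (fun i' k _ h2 h3 hv => h ⟨i', k, h2, h3, hv⟩)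

-- ---- B-side characterisation ----

theorem pvAdjViol_iff (s : List String) :
    pvAdjViol s = true ↔
      ∃ p, p + 1 < s.length ∧ (s.getD p "").toList <+: (s.getD (p + 1) "").toList := by
  fun_induction pvAdjViol s with
  | case1 x y rest ih =>
    rw [Bool.or_eq_true, ih, PySem.Str.startswith_eq, PySem.Chars.startswith_iff]
    constructor
    · rintro (hxy | ⟨p, hp, hpre⟩)
      · exact ⟨0, by simp, by simpa using hxy⟩
      · exact ⟨p + 1, by simpa using hp, by simpa using hpre⟩
    · rintro ⟨p, hp, hpre⟩
      rcases p with _ | p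
      · exact Or.inl (by simpa using hpre)
      · exact Or.inr ⟨p, by simpa using hp, by simpa using hpre⟩
  | case2 s h =>
    rcases s with _ | ⟨x, _ | ⟨y, rest⟩⟩
    · simp
    · simp
    · exact absurd rfl (h x y rest)

-- ---- order lemmas (lexicographic order on List Char) ----

theorem pvPrefix_not_lex (x : List Char) : ∀ (y : List Char), x <+: y →
    ¬ List.Lex (· < ·) y x := by
  induction x with
  | nil => intro y _ hlex; cases hlex
  | cons a x' ih =>
    intro y hpre hlex
    obtain ⟨t, rfl, hpre'⟩ := List.cons_prefix_iff.mp hpre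
    cases hlex with
    | cons hl => exact ih t hpre' hl
    | rel hr => exact lt_irrefl a hr

theorem pvPrefix_le (x y : List Char) (h : x <+: y) : x ≤ y :=
  not_lt.mp (pvPrefix_not_lex x y h)

theorem pvLex_between (x : List Char) : ∀ (z y : List Char),
    ¬ List.Lex (· < ·) z x → ¬ List.Lex (· < ·) y z → x <+: y → x <+: z := by
  induction x with
  | nil => intro z y _ _ _; exact List.nil_prefix
  | cons a x' ih =>
    intro z y h1 h2 hpre
    rcases z with _ | ⟨c, z'⟩
    · exact absurd List.Lex.nil h1
    obtain ⟨t, rfl, hpre'⟩ := List.cons_prefix_iff.mp hpre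
    rcases lt_trichotomy a c with hac | rfl | hca
    · exact absurd (List.Lex.rel hac) h2
    · have h1' : ¬ List.Lex (· < ·) z' x' := fun hl => h1 (List.Lex.cons hl)
      have h2' : ¬ List.Lex (· < ·) t z' := fun hl => h2 (List.Lex.cons hl)
      exact List.cons_prefix_iff.mpr ⟨z', rfl, ih z' t h1' h2' hpre'⟩
    · exact absurd (List.Lex.rel hca) h1

theorem pvPrefix_between (x z y : List Char) (h1 : x ≤ z) (h2 : z ≤ y) (h3 : x <+: y) :
    x <+: z :=
  pvLex_between x z y (not_lt.mpr h1) (not_lt.mpr h2) h3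

-- ---- pvBad is permutation-invariant ----

theorem pvPair_sublist (xs : List String) : ∀ (i j : Nat), i < j → j < xs.length →
    List.Sublist [xs.getD i "", xs.getD j ""] xs := by
  induction xs with
  | nil => intro i j _ hj; simp at hj
  | cons c xs ih =>
    intro i j hij hj
    rcases i with _ | i
    · rcases j with _ | j
      · omega
      · rw [List.getD_cons_zero, List.getD_cons_succ]
        refine List.Sublist.cons₂ c ?_
        rw [List.singleton_sublist, List.getD_eq_getElem xs "" (by simpa using hj)]
        exact List.getElem_mem _
    · rcases j with _ | j
      · omega
      · rw [List.getD_cons_succ, List.getD_cons_succ]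
        exact (ih i j (by omega) (by simpa using hj)).cons c

theorem pvPair_subperm (xs : List String) (i j : Nat) (hi : i < xs.length)
    (hj : j < xs.length) (hij : j ≠ i) :
    List.Subperm [xs.getD i "", xs.getD j ""] xs := by
  rcases Nat.lt_or_gt_of_ne (fun he => hij he.symm) with hlt | hgt
  · exact (pvPair_sublist xs i j hlt hj).subperm
  · exact ⟨[xs.getD j "", xs.getD i ""], List.Perm.swap _ _ _, pvPair_sublist xs j i hgt hi⟩

theorem pvPerm_pair {α : Type} {l : List α} {a b : α} (h : List.Perm l [a, b]) :
    l = [a, b] ∨ l = [b, a] := by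
  have hlen := h.length_eq
  rcases l with _ | ⟨c, _ | ⟨d, _ | ⟨e, t⟩⟩⟩ <;> simp at hlen
  have hc : c ∈ [a, b] := h.subset (List.mem_cons_self)
  simp at hc
  rcases hc with hc | hc
  · subst hc
    left
    have := h.cons_inv
    rw [List.perm_singleton] at this
    rw [this]
  · subst hc
    right
    have h2 : List.Perm [c, d] [c, a] := h.trans (List.Perm.swap c a [])
    have := h2.cons_inv
    rw [List.perm_singleton] at this
    rw [this]

theorem pvPair_sublist_indices (xs : List String) (a b : String)
    (h : List.Sublist [a, b] xs) :
    ∃ i j, i < j ∧ j < xs.length ∧ xs.getD i "" = a ∧ xs.getD j "" = b := by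
  induction xs with
  | nil => cases h
  | cons c xs ih =>
    cases h with
    | cons _ h' =>
      obtain ⟨i, j, hij, hj, ha, hb⟩ := ih h'
      exact ⟨i + 1, j + 1, by omega, by simp; omega, by simpa using ha, by simpa using hb⟩
    | cons₂ _ h' =>
      have hb : b ∈ xs := List.singleton_sublist.mp h'
      obtain ⟨j, hj, hjb⟩ := List.mem_iff_getElem.mp hb
      exact ⟨0, j + 1, by omega, by simp; omega, rfl,
        by rw [List.getD_cons_succ, List.getD_eq_getElem xs "" hj, hjb]⟩

theorem pvBad_iff_badM (xs : List String) : pvBad xs ↔ pvBadM xs := by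
  constructor
  · rintro ⟨i, j, hi, hj, hv⟩
    obtain ⟨hij, hpre⟩ := (pvViol_iff xs i j).mp hv
    exact ⟨xs.getD i "", xs.getD j "", hpre, pvPair_subperm xs i j hi hj hij⟩
  · rintro ⟨x, y, hpre, l, hperm, hsub⟩
    rcases pvPerm_pair hperm with rfl | rfl
    · obtain ⟨i, j, hij, hj, ha, hb⟩ := pvPair_sublist_indices xs x y hsub
      exact ⟨i, j, by omega, hj, (pvViol_iff xs i j).mpr ⟨by omega, by rw [ha, hb]; exact hpre⟩⟩
    · obtain ⟨i, j, hij, hj, ha, hb⟩ := pvPair_sublist_indices xs y x hsub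
      exact ⟨j, i, hj, by omega, (pvViol_iff xs j i).mpr ⟨by omega, by rw [ha, hb]; exact hpre⟩⟩

theorem pvBad_perm (xs ys : List String) (h : List.Perm xs ys) : pvBad xs ↔ pvBad ys := by
  rw [pvBad_iff_badM, pvBad_iff_badM]
  unfold pvBadM
  constructor <;> rintro ⟨x, y, hpre, hsp⟩
  · exact ⟨x, y, hpre, (h.subperm_left).mp hsp⟩
  · exact ⟨x, y, hpre, (h.subperm_left).mpr hsp⟩

-- ---- sorted bridge ----

theorem pvBad_sorted_iff_adj (s : List String)
    (hs : s.Pairwise (fun a b : String => a ≤ b)) :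
    pvBad s ↔ ∃ p, p + 1 < s.length ∧ (s.getD p "").toList <+: (s.getD (p + 1) "").toList := by
  have hmono : ∀ p q, p ≤ q → q < s.length →
      (s.getD p "").toList ≤ (s.getD q "").toList := by
    intro p q hpq hq
    rcases Nat.eq_or_lt_of_le hpq with rfl | hlt
    · exact le_rfl
    · rw [List.getD_eq_getElem s "" (by omega), List.getD_eq_getElem s "" hq]
      exact String.le_iff_toList_le.mp
        (List.pairwise_iff_getElem.mp hs p q (by omega) hq hlt)
  constructor
  · rintro ⟨i, j, hi, hj, hv⟩
    obtain ⟨hij, hpre⟩ := (pvViol_iff s i j).mp hv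
    rcases Nat.lt_or_gt_of_ne (fun he => hij he.symm) with hlt | hgt
    · exact ⟨i, by omega,
        pvPrefix_between _ _ _ (hmono i (i + 1) (by omega) (by omega))
          (hmono (i + 1) j (by omega) hj) hpre⟩
    · have e1 := pvPrefix_le _ _ hpre
      have e2 := hmono j i (by omega) hi
      have heq : (s.getD j "").toList = (s.getD i "").toList := le_antisymm e2 e1
      refine ⟨j, by omega, ?_⟩
      exact pvPrefix_between _ _ _ (hmono j (j + 1) (by omega) (by omega))
        (hmono (j + 1) i (by omega) hi) (heq ▸ List.prefix_refl _)
  · rintro ⟨p, hp, hpre⟩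
    exact ⟨p, p + 1, by omega, hp, (pvViol_iff s p (p + 1)).mpr ⟨by omega, hpre⟩⟩

theorem pvBad_iff_adjViol (xs : List String) :
    pvBad xs ↔ pvAdjViol (PySem.List.sorted xs (fun s => s) false) = true := by
  rw [pvAdjViol_iff]
  rw [← pvBad_sorted_iff_adj _ (PySem.List.sorted_pairwise xs (fun s => s))]
  exact pvBad_perm _ _ (PySem.List.sorted_perm xs (fun s => s) false).symm

theorem pvAlt_eq_zero_of_bad (xs : List String) (h : pvBad xs) : isInstantaneo_alt xs = 0 := by
  unfold isInstantaneo_alt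
  rw [if_pos ((pvBad_iff_adjViol xs).mp h)]

theorem pvAlt_eq_one_of_good (xs : List String) (h : ¬ pvBad xs) : isInstantaneo_alt xs = 1 := by
  unfold isInstantaneo_alt
  rw [if_neg (fun hh => h ((pvBad_iff_adjViol xs).mpr hh))]

-- ===== VERDICT (by name: the statement is the Claim_ definition above) =====
theorem isInstantaneo_spec : Claim_equal_isInstantaneo := by
  intro codigo _
  unfold Spec_isInstantaneo
  by_cases h : pvBad codigo
  · rw [isInstantaneo_eq_zero_of_bad codigo h, pvAlt_eq_zero_of_bad codigo h]
  · rw [isInstantaneo_eq_one_of_good codigo h, pvAlt_eq_one_of_good codigo h]
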